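-- pv_equiv track=rewrite | github.com/quantumrook/qr-static-site-generator | handlers/merge_with_post.py | __squish_post
-- ===== SOURCE A (Python) =====
-- def __squish_post(frontmatter, post_html_template, squished_body)-> str:
--     squished_post = ""
--     for line in post_html_template:
--         if "{{frontmatter}}" in line:
--             last_modified = frontmatter[2].strip("\n")
--             last_modified = last_modified.strip('"')
--             line = line.replace("{{frontmatter}}", f"Created: {frontmatter[1]} <br/>Last Modified: {last_modified}")
--         if "{{post_body}}" in line:
--             line = line.replace("{{post_body}}", squished_body)
--
--         squished_post += line
--     return squished_post
-- ===== SOURCE B (Python) =====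
-- def __squish_post(frontmatter, post_html_template, squished_body) -> str:
--     text = "".join(post_html_template)
--     if "{{frontmatter}}" in text:
--         last_modified = frontmatter[2].strip("\n").strip('"')
--         text = text.replace(
--             "{{frontmatter}}",
--             f"Created: {frontmatter[1]} <br/>Last Modified: {last_modified}",
--         )
--     if "{{post_body}}" in text:
--         text = text.replace("{{post_body}}", squished_body)
--     return text
-- ===== Notes on version B (the rewrite author's own statement) =====
-- stated objective: simpler
-- what changed: B joins the template into one string first and performs each substitution as a single guarded whole-string replace, dropping A's per-line loop; Pre_ excludes inputs where a pattern occurrence straddles a template-line boundary (A's per-line pass leaves it unsubstituted, B's whole-text pass substitutes it - an accidental corner no real template has) and inputs where '{{frontmatter}}' occurs while frontmatter has fewer than 3 items (A raises IndexError).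
import Mathlib
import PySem

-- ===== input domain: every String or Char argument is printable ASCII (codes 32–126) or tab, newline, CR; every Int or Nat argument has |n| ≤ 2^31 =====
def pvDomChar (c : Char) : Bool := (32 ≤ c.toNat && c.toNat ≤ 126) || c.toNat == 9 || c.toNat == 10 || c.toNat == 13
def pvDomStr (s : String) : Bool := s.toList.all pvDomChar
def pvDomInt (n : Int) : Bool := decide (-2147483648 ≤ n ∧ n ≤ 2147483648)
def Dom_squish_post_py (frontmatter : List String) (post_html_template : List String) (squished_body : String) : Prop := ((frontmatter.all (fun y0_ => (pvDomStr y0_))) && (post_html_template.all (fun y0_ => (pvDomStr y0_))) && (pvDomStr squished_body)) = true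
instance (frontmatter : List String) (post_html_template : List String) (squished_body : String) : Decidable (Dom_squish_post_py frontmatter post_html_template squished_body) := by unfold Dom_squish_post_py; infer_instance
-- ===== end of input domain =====

-- B joins the template into one string and does each substitution as one guarded
-- whole-string replace instead of A's per-line loop (objective: simpler).

-- the two template patterns and the frontmatter replacement text (shared by both ports,
-- since both Pythons use the same literals and the same f-string)
def pvFmPat : List Char := "{{frontmatter}}".toList
def pvBpPat : List Char := "{{post_body}}".toList
-- f"Created: {frontmatter[1]} <br/>Last Modified: {last_modified}" with
-- last_modified = frontmatter[2].strip("\n").strip('"'); list accesses are total here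
-- (getD ""), Pre_ excludes the inputs where Python would raise IndexError
def pvFmRepl (frontmatter : List String) : List Char :=
  "Created: ".toList ++ ((PySem.List.pyGet? frontmatter 1).getD "").toList
    ++ " <br/>Last Modified: ".toList
    ++ PySem.Chars.stripChars
         (PySem.Chars.stripChars ((PySem.List.pyGet? frontmatter 2).getD "").toList "\n".toList)
         "\"".toList

-- ===== PORT A =====
def squish_post_py (frontmatter : List String) (post_html_template : List String) (squished_body : String) : String :=
  String.ofList (post_html_template.foldl (fun acc line =>
    let l1 := if PySem.Chars.isIn pvFmPat line.toList
              then PySem.Chars.replace line.toList pvFmPat (pvFmRepl frontmatter)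
              else line.toList
    let l2 := if PySem.Chars.isIn pvBpPat l1
              then PySem.Chars.replace l1 pvBpPat squished_body.toList
              else l1
    acc ++ l2) [])

-- ===== PORT B =====
def squish_post_py_alt (frontmatter : List String) (post_html_template : List String) (squished_body : String) : String :=
  let text := (post_html_template.map String.toList).flatten
  let text1 := if PySem.Chars.isIn pvFmPat text
               then PySem.Chars.replace text pvFmPat (pvFmRepl frontmatter)
               else text
  let text2 := if PySem.Chars.isIn pvBpPat text1
               then PySem.Chars.replace text1 pvBpPat squished_body.toList
               else text1
  String.ofList text2

-- ===== PRECONDITION & SPEC =====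
-- pvNoCross pat lines: every occurrence of pat in the concatenation of lines lies
-- entirely within a single line (it does not straddle a line boundary)
def pvNoCross (pat : List Char) : List (List Char) → Bool
  | [] => true
  | l :: ls =>
      ((List.range l.length).all fun j =>
        !(pat.isPrefixOf ((l ++ ls.flatten).drop j)) || decide (j + pat.length ≤ l.length))
      && pvNoCross pat ls

-- Pre_ excludes (a) inputs where "{{frontmatter}}" occurs while frontmatter has fewer than
-- 3 items (Python A raises IndexError there), and (b) inputs where an occurrence of a
-- template pattern straddles a template-line boundary — there A's per-line pass leaves it
-- unsubstituted while B's whole-text pass substitutes it, an accidental corner of A's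
-- line-by-line implementation that no real template reaches (for the second pattern the
-- boundary condition is stated on the lines after the frontmatter substitution, which is
-- where A's second per-line pass and B's second whole-text pass must agree).
def Pre_squish_post_py (frontmatter : List String) (post_html_template : List String) (squished_body : String) : Prop :=
  (PySem.Chars.isIn pvFmPat ((post_html_template.map String.toList).flatten) = true → 3 ≤ frontmatter.length)
  ∧ pvNoCross pvFmPat (post_html_template.map String.toList) = true
  ∧ pvNoCross pvBpPat ((post_html_template.map String.toList).map
      (fun l => PySem.Chars.replace l pvFmPat (pvFmRepl frontmatter))) = true

instance (frontmatter : List String) (post_html_template : List String) (squished_body : String) : Decidable (Pre_squish_post_py frontmatter post_html_template squished_body) := by unfold Pre_squish_post_py; infer_instance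

def pvWitness_squish_post_py : List String × List String × String :=
  (["t", "2024", "\"2025\"\n"], ["<p>{{frontmatter}}</p>", "{{post_body}}"], "Hello")

def Spec_squish_post_py (frontmatter : List String) (post_html_template : List String) (squished_body : String) (out : String) : Prop := out = squish_post_py_alt frontmatter post_html_template squished_body
instance (frontmatter : List String) (post_html_template : List String) (squished_body : String) (out : String) : Decidable (Spec_squish_post_py frontmatter post_html_template squished_body out) := by unfold Spec_squish_post_py; infer_instance

-- ===== CLAIM (what is proved, stated in full; the proofs are below) =====
def Claim_equal_squish_post_py : Prop := ∀ (frontmatter : List String) (post_html_template : List String) (squished_body : String), Dom_squish_post_py frontmatter post_html_template squished_body → Pre_squish_post_py frontmatter post_html_template squished_body → Spec_squish_post_py frontmatter post_html_template squished_body (squish_post_py frontmatter post_html_template squished_body)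

-- ===== LEMMAS AND PROOFS =====


theorem pv_go_acc (old new : List Char) : ∀ (fuel : Nat) (l acc : List Char),
    PySem.Chars.replace.go old new fuel l acc = acc.reverse ++ PySem.Chars.replace.go old new fuel l [] := by
  intro fuel
  induction fuel with
  | zero => intro l acc; rw [PySem.Chars.replace.go.eq_def, PySem.Chars.replace.go.eq_def]; simp
  | succ n ih =>
    intro l acc
    cases l with
    | nil => rw [PySem.Chars.replace.go.eq_def, PySem.Chars.replace.go.eq_def]; simp
    | cons c t =>
      rw [PySem.Chars.replace.go.eq_def]
      conv_rhs => rw [PySem.Chars.replace.go.eq_def]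
      by_cases hp : old.isPrefixOf (c :: t) = true
      · simp only [hp, if_true]
        rw [ih _ (new.reverse ++ acc), ih _ (new.reverse ++ [])]
        simp
      · simp only [hp, if_false, Bool.false_eq_true]
        rw [ih t (c :: acc), ih t [c]]
        simp
theorem pv_go_zero (old new : List Char) (l acc : List Char) :
    PySem.Chars.replace.go old new 0 l acc = acc.reverse ++ l := by
  rw [PySem.Chars.replace.go.eq_def]

theorem pv_go_nil (old new : List Char) (fuel : Nat) (acc : List Char) :
    PySem.Chars.replace.go old new fuel [] acc = acc.reverse := by
  cases fuel with
  | zero => rw [PySem.Chars.replace.go.eq_def]; simp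
  | succ n => rw [PySem.Chars.replace.go.eq_def]

theorem pv_go_fuel (old new : List Char) (hold : old ≠ []) : ∀ (fuel fuel' : Nat) (l : List Char),
    l.length ≤ fuel → l.length ≤ fuel' →
    PySem.Chars.replace.go old new fuel l [] = PySem.Chars.replace.go old new fuel' l [] := by
  intro fuel
  induction fuel with
  | zero =>
    intro fuel' l h h'
    have : l = [] := List.length_eq_zero_iff.mp (Nat.le_zero.mp h)
    subst this
    rw [pv_go_zero, pv_go_nil]; simp
  | succ n ih =>
    intro fuel' l h h'
    cases l with
    | nil => rw [pv_go_nil, pv_go_nil]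
    | cons c t =>
      have hlen : (c :: t).length = t.length + 1 := by simp
      cases fuel' with
      | zero => simp [hlen] at h'
      | succ m =>
        rw [PySem.Chars.replace.go.eq_def]
        conv_rhs => rw [PySem.Chars.replace.go.eq_def]
        by_cases hp : old.isPrefixOf (c :: t) = true
        · simp only [hp, if_true]
          have hol : 1 ≤ old.length := by
            cases old with
            | nil => exact absurd rfl hold
            | cons _ _ => simp
          have hdl : ((c :: t).drop old.length).length ≤ n := by
            simp only [List.length_drop, hlen] at *; omega
          have hdl' : ((c :: t).drop old.length).length ≤ m := by
            simp only [List.length_drop, hlen] at *; omega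
          rw [pv_go_acc, pv_go_acc old new m]
          rw [ih m _ hdl hdl']
        · simp only [hp, if_false, Bool.false_eq_true]
          have ht : t.length ≤ n := by simp [hlen] at h; omega
          have ht' : t.length ≤ m := by simp [hlen] at h'; omega
          rw [pv_go_acc, pv_go_acc old new m]
          rw [ih m _ ht ht']

theorem pv_replace_eq_go (old new l : List Char) (hold : old ≠ []) :
    PySem.Chars.replace l old new = PySem.Chars.replace.go old new l.length l [] := by
  rw [PySem.Chars.replace]
  simp [List.isEmpty_iff, hold]

theorem pv_replace_nil (old new : List Char) (hold : old ≠ []) :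
    PySem.Chars.replace [] old new = [] := by
  rw [pv_replace_eq_go _ _ _ hold, pv_go_nil]; rfl

theorem pv_replace_pos (old new l : List Char) (hold : old ≠ []) (hpre : old <+: l) :
    PySem.Chars.replace l old new = new ++ PySem.Chars.replace (l.drop old.length) old new := by
  have hol : 1 ≤ old.length := by
    cases old with
    | nil => exact absurd rfl hold
    | cons _ _ => simp
  cases l with
  | nil =>
    have : old = [] := List.prefix_nil.mp hpre
    exact absurd this hold
  | cons c t =>
    rw [pv_replace_eq_go _ _ _ hold]
    rw [PySem.Chars.replace.go.eq_def]
    simp only [List.length_cons]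
    have hp : old.isPrefixOf (c :: t) = true := List.isPrefixOf_iff_prefix.mpr hpre
    simp only [hp, if_true]
    rw [pv_go_acc]
    have hlen : ((c :: t).drop old.length).length ≤ t.length := by
      simp only [List.length_drop, List.length_cons]; omega
    rw [pv_go_fuel old new hold t.length ((c :: t).drop old.length).length _ hlen le_rfl]
    rw [← pv_replace_eq_go _ _ _ hold]
    simp

theorem pv_replace_neg (old new : List Char) (c : Char) (t : List Char) (hold : old ≠ [])
    (hnpre : ¬ old <+: (c :: t)) :
    PySem.Chars.replace (c :: t) old new = c :: PySem.Chars.replace t old new := by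
  rw [pv_replace_eq_go _ _ _ hold]
  rw [PySem.Chars.replace.go.eq_def]
  simp only [List.length_cons]
  have hp : old.isPrefixOf (c :: t) = false := by
    rw [← Bool.not_eq_true]
    intro h
    exact hnpre (List.isPrefixOf_iff_prefix.mp h)
  simp only [hp, Bool.false_eq_true, if_false]
  rw [pv_go_acc]
  rw [← pv_replace_eq_go _ _ _ hold]
  simp

theorem pv_replace_of_not_infix (old new l : List Char) (hold : old ≠ []) (h : ¬ old <:+: l) :
    PySem.Chars.replace l old new = l := by
  induction l with
  | nil => exact pv_replace_nil _ _ hold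
  | cons c t ih =>
    have h1 : ¬ old <+: (c :: t) := fun hp => h hp.isInfix
    rw [pv_replace_neg _ _ _ _ hold h1]
    rw [ih (fun hi => h (List.infix_cons hi))]

theorem pv_replace_append (old new : List Char) (hold : old ≠ []) :
    ∀ (n : Nat) (a b : List Char), a.length ≤ n →
    (∀ j, j < a.length → old.isPrefixOf ((a ++ b).drop j) = true → j + old.length ≤ a.length) →
    PySem.Chars.replace (a ++ b) old new
      = PySem.Chars.replace a old new ++ PySem.Chars.replace b old new := by
  have hol : 1 ≤ old.length := by
    cases old with
    | nil => exact absurd rfl hold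
    | cons _ _ => simp
  intro n
  induction n with
  | zero =>
    intro a b ha _
    have : a = [] := List.length_eq_zero_iff.mp (Nat.le_zero.mp ha)
    subst this
    rw [pv_replace_nil _ _ hold]
    simp
  | succ n ih =>
    intro a b ha hcross
    cases a with
    | nil => rw [pv_replace_nil _ _ hold]; simp
    | cons c t =>
      by_cases hp : old <+: ((c :: t) ++ b)
      · have h0 : old.length ≤ (c :: t).length := by
          have := hcross 0 (by simp) (by simpa using List.isPrefixOf_iff_prefix.mpr hp)
          omega
        have hpa : old <+: (c :: t) := (List.isPrefix_append_of_length h0).mp hp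
        rw [pv_replace_pos _ _ _ hold hp, pv_replace_pos _ _ _ hold hpa]
        rw [List.drop_append_of_le_length h0]
        have hlen : ((c :: t).drop old.length).length ≤ n := by
          simp only [List.length_drop, List.length_cons] at *
          omega
        rw [ih _ b hlen ?_]
        · simp
        · intro j hj hpj
          rw [← List.drop_append_of_le_length h0, List.drop_drop] at hpj
          have h3 := hcross (old.length + j) (by simp only [List.length_drop, List.length_cons] at hj ⊢; omega) hpj
          simp only [List.length_drop, List.length_cons] at *
          omega
      · have hpa : ¬ old <+: (c :: t) := fun hq => hp (hq.trans (List.prefix_append _ _))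
        rw [List.cons_append, pv_replace_neg _ _ _ _ hold (by rw [← List.cons_append]; exact hp),
            pv_replace_neg _ _ _ _ hold hpa]
        have hlen : t.length ≤ n := by simp at ha; omega
        rw [ih t b hlen ?_]
        · simp
        · intro j hj hpj
          have h3 : old.isPrefixOf (List.drop (j + 1) ((c :: t) ++ b)) = true := by
            rw [List.cons_append]
            simpa using hpj
          have h4 := hcross (j + 1) (by simp only [List.length_cons]; omega) h3
          simp only [List.length_cons] at h4
          omega

theorem pv_replace_flatten (old new : List Char) (hold : old ≠ []) (ls : List (List Char))
    (h : pvNoCross old ls = true) :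
    PySem.Chars.replace ls.flatten old new
      = (ls.map (fun l => PySem.Chars.replace l old new)).flatten := by
  induction ls with
  | nil => simpa using pv_replace_nil old new hold
  | cons l ls ih =>
    rw [pvNoCross] at h
    simp only [Bool.and_eq_true] at h
    obtain ⟨h1, h2⟩ := h
    simp only [List.flatten_cons, List.map_cons]
    rw [pv_replace_append old new hold l.length l ls.flatten le_rfl ?_]
    · rw [ih h2]
    · intro j hj hpj
      simp only [List.all_eq_true, List.mem_range] at h1
      have := h1 j hj
      simp only [hpj, Bool.not_true, Bool.false_or, decide_eq_true_eq] at this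
      exact this

theorem pv_step_eq (pat : List Char) (hold : pat ≠ []) (new l : List Char) :
    (if PySem.Chars.isIn pat l then PySem.Chars.replace l pat new else l)
      = PySem.Chars.replace l pat new := by
  by_cases h : PySem.Chars.isIn pat l = true
  · simp [h]
  · rw [Bool.not_eq_true] at h
    simp only [h, Bool.false_eq_true, if_false]
    exact (pv_replace_of_not_infix pat new l hold ((PySem.Chars.isIn_eq_false_iff pat l).mp h)).symm

theorem pv_fmPat_ne : pvFmPat ≠ [] := by decide
theorem pv_bpPat_ne : pvBpPat ≠ [] := by decide

theorem pv_foldl_toList (g : List Char → List Char) (tpl : List String) (acc : List Char) :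
    tpl.foldl (fun acc line => acc ++ g line.toList) acc
      = acc ++ ((tpl.map String.toList).map g).flatten := by
  induction tpl generalizing acc with
  | nil => simp
  | cons s tpl ih => simp [ih]


-- ===== VERDICT (by name: the statement is the Claim_ definition above) =====
theorem squish_post_py_spec : Claim_equal_squish_post_py := by
  intro frontmatter post_html_template squished_body _hdom hpre
  obtain ⟨_hlen, hx1, hx2⟩ := hpre
  unfold Spec_squish_post_py
  unfold squish_post_py squish_post_py_alt
  simp only [pv_step_eq _ pv_fmPat_ne, pv_step_eq _ pv_bpPat_ne]
  congr 1
  rw [pv_foldl_toList (fun x => PySem.Chars.replace (PySem.Chars.replace x pvFmPat (pvFmRepl frontmatter)) pvBpPat squished_body.toList)]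
  rw [List.nil_append]
  rw [show (fun x => PySem.Chars.replace (PySem.Chars.replace x pvFmPat (pvFmRepl frontmatter)) pvBpPat squished_body.toList)
        = ((fun l => PySem.Chars.replace l pvBpPat squished_body.toList)
            ∘ (fun l => PySem.Chars.replace l pvFmPat (pvFmRepl frontmatter))) from rfl]
  rw [← List.map_map]
  rw [← pv_replace_flatten _ _ pv_bpPat_ne _ hx2]
  rw [← pv_replace_flatten _ _ pv_fmPat_ne _ hx1]
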